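-- pv_equiv track=rewrite | github.com/JNZader/repoforge | repoforge/incremental.py | _match_chapter_to_layers
-- ===== SOURCE A (Python) =====
-- def _match_chapter_to_layers(
--     chapter: dict,
--     layer_files: dict[str, list[str]],
-- ) -> list[str]:
--     """Heuristic: match chapter to layers by keyword overlap."""
--     text = (
--         chapter.get("title", "") + " " + chapter.get("description", "")
--     ).lower()
--
--     # Keywords that map to common layer names
--     _LAYER_KEYWORDS: dict[str, list[str]] = {
--         "frontend": ["ui", "component", "page", "frontend", "client", "web", "screen"],
--         "backend": ["api", "endpoint", "server", "handler", "controller", "backend", "service"],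
--         "shared": ["shared", "common", "core", "util", "lib", "type"],
--         "infra": ["infra", "deploy", "docker", "ci", "terraform", "helm", "k8s"],
--     }
--
--     matched_files: list[str] = []
--     for layer_name, files in layer_files.items():
--         layer_lower = layer_name.lower()
--         # Direct name match
--         if layer_lower in text:
--             matched_files.extend(files)
--             continue
--         # Keyword match
--         for _canonical, keywords in _LAYER_KEYWORDS.items():
--             if any(kw in layer_lower for kw in keywords):
--                 if any(kw in text for kw in keywords):
--                     matched_files.extend(files)
--                     break
--
--     return matched_files
-- ===== SOURCE B (Python) =====
-- def _match_chapter_to_layers(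
--     chapter: dict,
--     layer_files: dict[str, list[str]],
-- ) -> list[str]:
--     """Heuristic: match chapter to layers by keyword overlap."""
--     text = (
--         chapter.get("title", "") + " " + chapter.get("description", "")
--     ).lower()
--
--     _LAYER_KEYWORDS: dict[str, list[str]] = {
--         "frontend": ["ui", "component", "page", "frontend", "client", "web", "screen"],
--         "backend": ["api", "endpoint", "server", "handler", "controller", "backend", "service"],
--         "shared": ["shared", "common", "core", "util", "lib", "type"],
--         "infra": ["infra", "deploy", "docker", "ci", "terraform", "helm", "k8s"],
--     }
--
--     # Flatten the keyword groups that appear in the chapter text into a single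
--     # flat probe list; the group/break structure disappears entirely.
--     probes = [
--         kw
--         for kws in _LAYER_KEYWORDS.values()
--         if any(k in text for k in kws)
--         for kw in kws
--     ]
--
--     # A layer matches iff its lowered name occurs in the text, or contains any probe.
--     def hit(name: str) -> bool:
--         ll = name.lower()
--         return ll in text or any(p in ll for p in probes)
--
--     return [f for name, files in layer_files.items() if hit(name) for f in files]
-- ===== Notes on version B (the rewrite author's own statement) =====
-- stated objective: simpler
-- what changed: Erases A's nested per-layer break-loop over keyword groups: B flattens the keyword groups present in the chapter text into one flat probe list computed once, decides each layer by a single substring test against that list, and emits the result as one flat comprehension instead of an extend-accumulator loop.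
import Mathlib
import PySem

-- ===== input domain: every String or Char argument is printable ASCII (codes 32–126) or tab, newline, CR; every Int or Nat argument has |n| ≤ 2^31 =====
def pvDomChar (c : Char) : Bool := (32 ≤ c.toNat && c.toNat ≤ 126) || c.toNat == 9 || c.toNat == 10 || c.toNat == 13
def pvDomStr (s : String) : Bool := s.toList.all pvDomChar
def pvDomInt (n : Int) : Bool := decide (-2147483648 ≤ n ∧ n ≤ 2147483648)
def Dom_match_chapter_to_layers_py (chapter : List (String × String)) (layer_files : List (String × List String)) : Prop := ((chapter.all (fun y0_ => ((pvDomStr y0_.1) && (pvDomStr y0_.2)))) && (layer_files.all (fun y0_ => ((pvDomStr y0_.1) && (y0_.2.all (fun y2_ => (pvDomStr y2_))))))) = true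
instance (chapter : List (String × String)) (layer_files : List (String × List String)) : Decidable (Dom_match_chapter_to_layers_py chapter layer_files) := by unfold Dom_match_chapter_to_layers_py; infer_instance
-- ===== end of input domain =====

-- ===== PORT A =====
-- B flattens the text-active keyword groups into a single probe list and emits the
-- result as one flat comprehension (simpler decomposition; same return value).
def pvLayerKeywords : List (String × List String) :=
  [("frontend", ["ui", "component", "page", "frontend", "client", "web", "screen"]),
   ("backend", ["api", "endpoint", "server", "handler", "controller", "backend", "service"]),
   ("shared", ["shared", "common", "core", "util", "lib", "type"]),
   ("infra", ["infra", "deploy", "docker", "ci", "terraform", "helm", "k8s"])]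

-- the inner 'for _canonical, keywords in _LAYER_KEYWORDS.items()' loop with its break
def pvKwLoop (text ll : String) (files acc : List String) : List (String × List String) → List String
  | [] => acc
  | (_, kws) :: rest =>
      if kws.any (fun kw => PySem.Str.isIn kw ll) then
        if kws.any (fun kw => PySem.Str.isIn kw text) then acc ++ files
        else pvKwLoop text ll files acc rest
      else pvKwLoop text ll files acc rest

-- the outer 'for layer_name, files in layer_files.items()' loop
def pvALoop (text : String) (acc : List String) : List (String × List String) → List String
  | [] => acc
  | (layer_name, files) :: rest =>
      let ll := PySem.Str.lower layer_name
      if PySem.Str.isIn ll text then pvALoop text (acc ++ files) rest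
      else pvALoop text (pvKwLoop text ll files acc pvLayerKeywords) rest

def match_chapter_to_layers_py (chapter : List (String × String)) (layer_files : List (String × List String)) : List String :=
  let text := PySem.Str.lower (PySem.Dict.getD (PySem.Dict.mk chapter) "title" "" ++ " " ++ PySem.Dict.getD (PySem.Dict.mk chapter) "description" "")
  pvALoop text [] layer_files

-- ===== PORT B =====
-- Source B iterates _LAYER_KEYWORDS.values(); the groups in order:
def pvKeywordGroups : List (List String) :=
  [["ui", "component", "page", "frontend", "client", "web", "screen"],
   ["api", "endpoint", "server", "handler", "controller", "backend", "service"],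
   ["shared", "common", "core", "util", "lib", "type"],
   ["infra", "deploy", "docker", "ci", "terraform", "helm", "k8s"]]

def match_chapter_to_layers_py_alt (chapter : List (String × String)) (layer_files : List (String × List String)) : List String :=
  let text := PySem.Str.lower (PySem.Dict.getD (PySem.Dict.mk chapter) "title" "" ++ " " ++ PySem.Dict.getD (PySem.Dict.mk chapter) "description" "")
  -- probes = [kw for kws in groups if any(k in text for k in kws) for kw in kws]
  let probes := (pvKeywordGroups.filter (fun kws => kws.any (fun k => PySem.Str.isIn k text))).flatMap (fun kws => kws)
  let hit := fun (name : String) =>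
    let ll := PySem.Str.lower name
    PySem.Str.isIn ll text || probes.any (fun p => PySem.Str.isIn p ll)
  layer_files.flatMap (fun lf => if hit lf.1 then lf.2 else [])

-- ===== PRECONDITION & SPEC =====
def Spec_match_chapter_to_layers_py (chapter : List (String × String)) (layer_files : List (String × List String)) (out : List String) : Prop := out = match_chapter_to_layers_py_alt chapter layer_files
instance (chapter : List (String × String)) (layer_files : List (String × List String)) (out : List String) : Decidable (Spec_match_chapter_to_layers_py chapter layer_files out) := by unfold Spec_match_chapter_to_layers_py; infer_instance

-- ===== CLAIM (what is proved, stated in full; the proofs are below) =====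
def Claim_equal_match_chapter_to_layers_py : Prop := ∀ (chapter : List (String × String)) (layer_files : List (String × List String)), Dom_match_chapter_to_layers_py chapter layer_files → Spec_match_chapter_to_layers_py chapter layer_files (match_chapter_to_layers_py chapter layer_files)

-- ===== LEMMAS AND PROOFS =====
-- A's inner break-loop over the groups equals B's flat probe-list test.
theorem pvKwLoop_eq (text ll : String) (files acc : List String) (gs : List (String × List String)) :
    pvKwLoop text ll files acc gs =
      if (((gs.map Prod.snd).filter (fun kws => kws.any (fun k => PySem.Str.isIn k text))).flatMap
            (fun kws => kws)).any (fun p => PySem.Str.isIn p ll) then acc ++ files else acc := by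
  induction gs with
  | nil => simp [pvKwLoop]
  | cons g rest ih =>
    obtain ⟨c, kws⟩ := g
    simp only [pvKwLoop, List.map_cons, List.filter_cons]
    by_cases hl : (kws.any fun kw => PySem.Str.isIn kw ll) = true
    · by_cases ht : (kws.any fun kw => PySem.Str.isIn kw text) = true
      · rw [if_pos hl, if_pos ht, if_pos ht, List.flatMap_cons, List.any_append, hl, Bool.true_or, if_pos rfl]
      · rw [if_pos hl, if_neg ht, if_neg ht, ih]
    · have hl' : (kws.any fun kw => PySem.Str.isIn kw ll) = false := Bool.eq_false_iff.mpr hl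
      by_cases ht : (kws.any fun kw => PySem.Str.isIn kw text) = true
      · rw [if_neg hl, if_pos ht, ih, List.flatMap_cons, List.any_append, hl', Bool.false_or]
      · rw [if_neg hl, if_neg ht, ih]

-- A's outer accumulator loop equals B's flat flatMap over the layers.
theorem pvALoop_eq (text : String) (acc : List String) (lfs : List (String × List String)) :
    pvALoop text acc lfs =
      acc ++ lfs.flatMap (fun lf =>
        if PySem.Str.isIn (PySem.Str.lower lf.1) text ||
            ((((pvLayerKeywords.map Prod.snd).filter (fun kws => kws.any (fun k => PySem.Str.isIn k text))).flatMap
               (fun kws => kws)).any (fun p => PySem.Str.isIn p (PySem.Str.lower lf.1))) then lf.2 else []) := by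
  induction lfs generalizing acc with
  | nil => simp [pvALoop]
  | cons lf rest ih =>
    obtain ⟨name, files⟩ := lf
    simp only [pvALoop, List.flatMap_cons]
    by_cases hd : PySem.Str.isIn (PySem.Str.lower name) text = true
    · rw [if_pos hd, ih, hd, Bool.true_or, if_pos rfl, List.append_assoc]
    · have hd' : PySem.Str.isIn (PySem.Str.lower name) text = false := Bool.eq_false_iff.mpr hd
      rw [if_neg hd, pvKwLoop_eq, ih, hd', Bool.false_or]
      by_cases hk : ((((pvLayerKeywords.map Prod.snd).filter (fun kws => kws.any (fun k => PySem.Str.isIn k text))).flatMap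
            (fun kws => kws)).any (fun p => PySem.Str.isIn p (PySem.Str.lower name))) = true
      · rw [if_pos hk, hk, if_pos rfl, List.append_assoc]
      · have hk' := Bool.eq_false_iff.mpr hk
        rw [if_neg hk, hk', if_neg Bool.false_ne_true, List.nil_append]

-- ===== VERDICT (by name: the statement is the Claim_ definition above) =====
theorem match_chapter_to_layers_py_spec : Claim_equal_match_chapter_to_layers_py := by
  intro chapter layer_files _
  unfold Spec_match_chapter_to_layers_py match_chapter_to_layers_py match_chapter_to_layers_py_alt
  simp only [pvALoop_eq]
  rfl
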